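-- pv_equiv track=rewrite | github.com/nekoTheShadow/book_puzzle_algorithm | ch01_02/main.py | calc_empty
-- ===== SOURCE A (Python) =====
-- EMPTY = 0
--
-- def calc_empty(signs: list[int]) -> tuple[list[float], list[int]]:
--     new_vals: list[float] = []
--     new_signs: list[int] = []
--
--     val = 1
--     for i in range(len(signs)):
--         add = i + 2
--         if signs[i] == EMPTY:
--             val = val * 10 + add
--         else:
--             new_vals.append(val)
--             new_signs.append(signs[i])
--             val = add
--
--     new_vals.append(val)
--     return (new_vals, new_signs)
-- ===== SOURCE B (Python) =====
-- EMPTY = 0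
--
-- def calc_empty(signs):
--     bounds = [i for i, s in enumerate(signs) if s != EMPTY]
--
--     def seg(b, nxt):
--         v = b + 2
--         for p in range(b + 1, nxt):
--             v = v * 10 + (p + 2)
--         return v
--
--     new_vals = [seg(b, nxt) for b, nxt in zip([-1] + bounds, bounds + [len(signs)])]
--     new_signs = [s for s in signs if s != EMPTY]
--     return (new_vals, new_signs)
-- ===== Notes on version B (the rewrite author's own statement) =====
-- stated objective: alternative
-- what changed: A builds both output lists in one stateful pass carrying a running value; B first computes the non-empty boundary indices, then derives each output value independently as a fold over its segment of indices and the signs by a filter.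
import Mathlib
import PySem

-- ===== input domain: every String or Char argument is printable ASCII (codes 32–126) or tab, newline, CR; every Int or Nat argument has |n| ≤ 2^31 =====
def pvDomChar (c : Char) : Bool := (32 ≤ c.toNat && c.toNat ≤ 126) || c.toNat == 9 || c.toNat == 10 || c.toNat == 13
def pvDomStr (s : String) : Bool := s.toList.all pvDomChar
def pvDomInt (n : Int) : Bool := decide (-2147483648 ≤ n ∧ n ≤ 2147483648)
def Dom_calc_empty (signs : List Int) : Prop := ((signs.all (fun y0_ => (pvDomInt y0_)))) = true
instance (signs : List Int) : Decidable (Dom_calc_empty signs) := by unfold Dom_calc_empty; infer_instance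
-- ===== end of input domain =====

-- B replaces A's single stateful accumulator loop by a segment decomposition
-- (boundary indices, then one independent fold per segment); objective: alternative.

-- ===== PORT A =====
-- A's loop over i in range(len(signs)), carrying (new_vals, new_signs, val);
-- rest = signs[i:], so indexing signs[i] is the head of rest.
def calcEmptyLoop : List Int → Int → List Int → List Int → Int → (List Int × List Int × Int)
  | [], _, newVals, newSigns, val => (newVals, newSigns, val)
  | s :: rest, i, newVals, newSigns, val =>
    let add := i + 2
    if s == 0 then calcEmptyLoop rest (i + 1) newVals newSigns (val * 10 + add)
    else calcEmptyLoop rest (i + 1) (newVals ++ [val]) (newSigns ++ [s]) add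

def calc_empty (signs : List Int) : List Int × List Int :=
  let r := calcEmptyLoop signs 0 [] [] 1
  (r.1 ++ [r.2.2], r.2.1)

-- ===== PORT B =====
-- seg(b, nxt) from Source B: value of the segment between boundaries b and nxt
def segVal (b nxt : Int) : Int :=
  (PySem.List.pyRange (b + 1) nxt 1).foldl (fun v p => v * 10 + (p + 2)) (b + 2)

def calc_empty_alt (signs : List Int) : List Int × List Int :=
  let bounds := ((PySem.List.enumerate signs 0).filter (fun p => p.2 != 0)).map (·.1)
  let newVals := (List.zip ((-1) :: bounds) (bounds ++ [(signs.length : Int)])).map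
      (fun p => segVal p.1 p.2)
  let newSigns := signs.filter (fun s => s != 0)
  (newVals, newSigns)

-- ===== PRECONDITION & SPEC =====
def Spec_calc_empty (signs : List Int) (out : List Int × List Int) : Prop := out = calc_empty_alt signs
instance (signs : List Int) (out : List Int × List Int) : Decidable (Spec_calc_empty signs out) := by unfold Spec_calc_empty; infer_instance

-- ===== CLAIM (what is proved, stated in full; the proofs are below) =====
def Claim_equal_calc_empty : Prop := ∀ (signs : List Int), Dom_calc_empty signs → Spec_calc_empty signs (calc_empty signs)

-- ===== LEMMAS AND PROOFS =====

-- boundary indices of the suffix `rest` whose first element has index i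
def bndsFrom (rest : List Int) (i : Int) : List Int :=
  ((PySem.List.enumerate rest i).filter (fun p => p.2 != 0)).map (·.1)

theorem bndsFrom_nil (i : Int) : bndsFrom [] i = [] := rfl

theorem bndsFrom_cons (s : Int) (rest : List Int) (i : Int) :
    bndsFrom (s :: rest) i = if s == 0 then bndsFrom rest (i + 1) else i :: bndsFrom rest (i + 1) := by
  simp only [bndsFrom, PySem.List.enumerate_cons, List.filter_cons]
  by_cases h : s = 0 <;> simp [h]

theorem segVal_succ {b i : Int} (h : b < i) :
    segVal b i * 10 + (i + 2) = segVal b (i + 1) := by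
  unfold segVal
  rw [PySem.List.pyRange_one_succ_right (by omega : b + 1 ≤ i), List.foldl_append]
  simp

theorem segVal_self (i : Int) : segVal i (i + 1) = i + 2 := by
  unfold segVal
  rw [PySem.List.pyRange_one_eq_nil (by omega : i + 1 ≤ i + 1)]
  rfl

-- Main invariant: running A's loop on `rest` (starting index i, value = the
-- partially-built segment since boundary b) produces B's segment decomposition.
theorem loop_eq : ∀ (rest : List Int) (b i : Int) (vals sgns : List Int), b < i →
    (let r := calcEmptyLoop rest i vals sgns (segVal b i); (r.1 ++ [r.2.2], r.2.1)) =
      (vals ++ (List.zip (b :: bndsFrom rest i) (bndsFrom rest i ++ [i + (rest.length : Int)])).map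
          (fun p => segVal p.1 p.2),
       sgns ++ rest.filter (fun s => s != 0)) := by
  intro rest
  induction rest with
  | nil =>
    intro b i vals sgns h
    simp [calcEmptyLoop, bndsFrom_nil]
  | cons s r ih =>
    intro b i vals sgns h
    simp only [calcEmptyLoop, bndsFrom_cons, List.filter_cons]
    by_cases hs : s = 0
    · subst hs
      simp only [beq_self_eq_true, if_true, bne_self_eq_false, Bool.false_eq_true,
        if_false]
      rw [segVal_succ h]
      have := ih b (i + 1) vals sgns (by omega)
      simp only at this ⊢
      rw [this]
      simp only [List.length_cons]
      rw [show (i + ((r.length + 1 : ℕ) : ℤ)) = i + 1 + (r.length : ℤ) from by push_cast; ring]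
    · simp only [beq_iff_eq, hs, if_false, bne_iff_ne, ne_eq]
      rw [show (i + 2 : Int) = segVal i (i + 1) from (segVal_self i).symm]
      have := ih i (i + 1) (vals ++ [segVal b i]) (sgns ++ [s]) (by omega)
      simp only at this ⊢
      rw [this]
      simp only [List.length_cons, Prod.mk.injEq,
        List.append_assoc, List.singleton_append]
      rw [show (i + ((r.length + 1 : ℕ) : ℤ)) = i + 1 + (r.length : ℤ) from by push_cast; ring]
      simp

theorem segVal_init : segVal (-1) 0 = 1 := by
  unfold segVal
  rw [show (-1 : Int) + 1 = 0 from by ring, PySem.List.pyRange_one_eq_nil le_rfl]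
  rfl

-- ===== VERDICT (by name: the statement is the Claim_ definition above) =====
theorem calc_empty_spec : Claim_equal_calc_empty := by
  intro signs _
  unfold Spec_calc_empty calc_empty calc_empty_alt
  have h := loop_eq signs (-1) 0 [] [] (by omega)
  rw [segVal_init] at h
  simp only [List.nil_append] at h
  rw [h]
  simp [bndsFrom]
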